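-- pv_equiv track=rewrite | github.com/staffbotsteve/sosfiler | backend/launch_readiness.py | lifecycle_support
-- ===== SOURCE A (Python) =====
-- from typing import Any
--
-- LIFECYCLE_WORKFLOWS = [
--     "annual_report",
--     "amendment",
--     "registered_agent_change",
--     "certificate_status",
--     "certified_copy",
--     "dissolution",
--     "withdrawal",
--     "reinstatement",
--     "compliance_reminder",
-- ]
--
-- def lifecycle_support(manifest: dict[str, Any]) -> dict[str, str]:
--     counts = manifest.get("record_counts") or {}
--     support: dict[str, str] = {}
--     for workflow in LIFECYCLE_WORKFLOWS:
--         if workflow == "compliance_reminder":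
--             support[workflow] = "supported" if counts.get("annual_obligation") else "operator_research_required"
--         elif workflow == "certificate_status":
--             support[workflow] = "operator_assisted" if counts.get("other_license") or counts.get("formation") else "operator_research_required"
--         elif workflow == "certified_copy":
--             support[workflow] = "operator_assisted" if counts.get("formation") else "operator_research_required"
--         elif workflow == "withdrawal":
--             support[workflow] = "operator_assisted" if counts.get("foreign_authority") or counts.get("dissolution") else "operator_research_required"
--         else:
--             support[workflow] = "operator_assisted" if counts.get(workflow) else "operator_research_required"
--     return support
-- ===== SOURCE B (Python) =====
-- LIFECYCLE_WORKFLOWS = [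
--     "annual_report",
--     "amendment",
--     "registered_agent_change",
--     "certificate_status",
--     "certified_copy",
--     "dissolution",
--     "withdrawal",
--     "reinstatement",
--     "compliance_reminder",
-- ]
--
-- # reverse index: each record-count key -> the workflows a truthy count of it enables
-- _ENABLES = {
--     "annual_report": ("annual_report",),
--     "amendment": ("amendment",),
--     "registered_agent_change": ("registered_agent_change",),
--     "other_license": ("certificate_status",),
--     "formation": ("certificate_status", "certified_copy"),
--     "dissolution": ("dissolution", "withdrawal"),
--     "foreign_authority": ("withdrawal",),
--     "reinstatement": ("reinstatement",),
--     "annual_obligation": ("compliance_reminder",),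
-- }
--
-- def lifecycle_support(manifest):
--     counts = manifest.get("record_counts") or {}
--     enabled = set()
--     for key, value in counts.items():
--         if value:
--             enabled.update(_ENABLES.get(key, ()))
--     return {
--         w: (("supported" if w == "compliance_reminder" else "operator_assisted")
--             if w in enabled else "operator_research_required")
--         for w in LIFECYCLE_WORKFLOWS
--     }
-- ===== Notes on version B (the rewrite author's own statement) =====
-- stated objective: alternative
-- what changed: B inverts the data flow: instead of probing counts per workflow through an if/elif chain, it scans counts once through a reverse index (count key -> workflows it enables) to collect an enabled-set, then labels every workflow by set membership.
import Mathlib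
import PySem

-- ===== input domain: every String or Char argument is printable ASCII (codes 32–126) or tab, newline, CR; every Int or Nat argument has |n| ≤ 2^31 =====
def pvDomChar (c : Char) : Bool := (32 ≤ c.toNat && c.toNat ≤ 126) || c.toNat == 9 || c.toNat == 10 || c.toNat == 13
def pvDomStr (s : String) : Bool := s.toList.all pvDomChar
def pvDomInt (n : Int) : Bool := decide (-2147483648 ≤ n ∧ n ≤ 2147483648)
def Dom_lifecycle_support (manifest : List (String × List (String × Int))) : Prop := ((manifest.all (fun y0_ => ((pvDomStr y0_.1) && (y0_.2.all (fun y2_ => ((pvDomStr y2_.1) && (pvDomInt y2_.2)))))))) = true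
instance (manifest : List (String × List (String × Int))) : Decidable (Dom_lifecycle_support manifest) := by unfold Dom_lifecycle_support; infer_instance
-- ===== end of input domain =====

-- B inverts the data flow: one scan over counts through a reverse index (count key ↦ enabled
-- workflows) collects an enabled-set, then labels come from set membership; same cost ('alternative').

-- Python truthiness of an int-or-missing value (counts.get(k))
def pvTruthy (o : Option Int) : Bool :=
  match o with
  | some v => v != 0
  | none => false

def pvWorkflows : List String :=
  ["annual_report", "amendment", "registered_agent_change", "certificate_status",
   "certified_copy", "dissolution", "withdrawal", "reinstatement", "compliance_reminder"]

-- counts = manifest.get("record_counts") or {}   ('or {}': an empty dict value is falsy)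
def pvCounts (manifest : List (String × List (String × Int))) : PySem.Dict String Int :=
  match (PySem.Dict.ofList manifest).get? "record_counts" with
  | some c => if c.isEmpty then PySem.Dict.ofList [] else PySem.Dict.ofList c
  | none => PySem.Dict.ofList []

-- ===== PORT A =====
def lifecycle_support (manifest : List (String × List (String × Int))) : List (String × String) :=
  let counts := pvCounts manifest
  let support := pvWorkflows.foldl (fun s workflow =>
    if workflow == "compliance_reminder" then
      s.insert workflow (if pvTruthy (counts.get? "annual_obligation") then "supported" else "operator_research_required")
    else if workflow == "certificate_status" then
      s.insert workflow (if pvTruthy (counts.get? "other_license") || pvTruthy (counts.get? "formation") then "operator_assisted" else "operator_research_required")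
    else if workflow == "certified_copy" then
      s.insert workflow (if pvTruthy (counts.get? "formation") then "operator_assisted" else "operator_research_required")
    else if workflow == "withdrawal" then
      s.insert workflow (if pvTruthy (counts.get? "foreign_authority") || pvTruthy (counts.get? "dissolution") then "operator_assisted" else "operator_research_required")
    else
      s.insert workflow (if pvTruthy (counts.get? workflow) then "operator_assisted" else "operator_research_required"))
    PySem.Dict.empty
  support.items

-- ===== PORT B =====
-- _ENABLES: reverse index from a record-count key to the workflows a truthy count enables
def pvEnablesDict : PySem.Dict String (List String) :=
  PySem.Dict.mk
    [("annual_report", ["annual_report"]),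
     ("amendment", ["amendment"]),
     ("registered_agent_change", ["registered_agent_change"]),
     ("other_license", ["certificate_status"]),
     ("formation", ["certificate_status", "certified_copy"]),
     ("dissolution", ["dissolution", "withdrawal"]),
     ("foreign_authority", ["withdrawal"]),
     ("reinstatement", ["reinstatement"]),
     ("annual_obligation", ["compliance_reminder"])]

-- the enabled-set collected by the 'for key, value in counts.items()' loop
def pvEnabled (counts : PySem.Dict String Int) : PySem.Set String :=
  counts.items.foldl (fun s kv =>
    if kv.2 != 0 then PySem.Set.update s (pvEnablesDict.getD kv.1 []) else s) PySem.Set.empty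

def lifecycle_support_alt (manifest : List (String × List (String × Int))) : List (String × String) :=
  let counts := pvCounts manifest
  let enabled := pvEnabled counts
  let result := pvWorkflows.foldl (fun d w =>
    d.insert w (if PySem.Set.contains enabled w then
                  (if w == "compliance_reminder" then "supported" else "operator_assisted")
                else "operator_research_required")) PySem.Dict.empty
  result.items

-- ===== PRECONDITION & SPEC =====
def Spec_lifecycle_support (manifest : List (String × List (String × Int))) (out : List (String × String)) : Prop := out = lifecycle_support_alt manifest
instance (manifest : List (String × List (String × Int))) (out : List (String × String)) : Decidable (Spec_lifecycle_support manifest out) := by unfold Spec_lifecycle_support; infer_instance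

-- ===== CLAIM (what is proved, stated in full; the proofs are below) =====
def Claim_equal_lifecycle_support : Prop := ∀ (manifest : List (String × List (String × Int))), Dom_lifecycle_support manifest → Spec_lifecycle_support manifest (lifecycle_support manifest)

-- ===== LEMMAS AND PROOFS =====

theorem mem_enabled_fold (l : List (String × Int)) (s : PySem.Set String) (x : String) :
    x ∈ l.foldl (fun s kv =>
      if kv.2 != 0 then PySem.Set.update s (pvEnablesDict.getD kv.1 []) else s) s ↔
    x ∈ s ∨ ∃ p ∈ l, p.2 ≠ 0 ∧ x ∈ pvEnablesDict.getD p.1 [] := by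
  induction l generalizing s with
  | nil => simp
  | cons kv rest ih =>
    rw [List.foldl_cons]
    by_cases h : kv.2 = 0
    · rw [show (if kv.2 != 0 then PySem.Set.update s (pvEnablesDict.getD kv.1 []) else s) = s by
        simp [h], ih]
      constructor
      · rintro (hx | ⟨p, hp, h2, h3⟩)
        · exact Or.inl hx
        · exact Or.inr ⟨p, List.mem_cons_of_mem _ hp, h2, h3⟩
      · rintro (hx | ⟨p, hp, h2, h3⟩)
        · exact Or.inl hx
        · rcases List.mem_cons.1 hp with rfl | hp'
          · exact absurd h h2.elim
          · exact Or.inr ⟨p, hp', h2, h3⟩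
    · rw [show (if kv.2 != 0 then PySem.Set.update s (pvEnablesDict.getD kv.1 []) else s) =
          PySem.Set.update s (pvEnablesDict.getD kv.1 []) by simp [h], ih]
      rw [PySem.Set.mem_update]
      constructor
      · rintro ((hx | hk) | ⟨p, hp, h2, h3⟩)
        · exact Or.inl hx
        · exact Or.inr ⟨kv, List.mem_cons_self, h, hk⟩
        · exact Or.inr ⟨p, List.mem_cons_of_mem _ hp, h2, h3⟩
      · rintro (hx | ⟨p, hp, h2, h3⟩)
        · exact Or.inl (Or.inl hx)
        · rcases List.mem_cons.1 hp with rfl | hp'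
          · exact Or.inl (Or.inr h3)
          · exact Or.inr ⟨p, hp', h2, h3⟩

theorem truthy_iff (d : PySem.Dict String Int) (hd : d.keys.Nodup) (k : String) :
    pvTruthy (d.get? k) = true ↔ ∃ v, (k, v) ∈ d.items ∧ v ≠ 0 := by
  cases hg : d.get? k with
  | none =>
    simp only [pvTruthy, Bool.false_eq_true, false_iff]
    rintro ⟨v, hv, _⟩
    have := PySem.Dict.get?_of_mem_items d hv hd
    simp [this] at hg
  | some v =>
    simp only [pvTruthy, bne_iff_ne]
    constructor
    · intro h; exact ⟨v, PySem.Dict.mem_items_of_get?_eq_some d hg, h⟩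
    · rintro ⟨v', hv', h⟩
      have := PySem.Dict.get?_of_mem_items d hv' hd
      rw [hg] at this
      cases this
      exact h

theorem mem_enabled_iff (d : PySem.Dict String Int) (hd : d.keys.Nodup) (x : String) :
    x ∈ pvEnabled d ↔ ∃ k, pvTruthy (d.get? k) = true ∧ x ∈ pvEnablesDict.getD k [] := by
  unfold pvEnabled
  rw [mem_enabled_fold]
  simp only [PySem.Set.empty, List.not_mem_nil, false_or]
  constructor
  · rintro ⟨⟨k, v⟩, hp, hv, hx⟩
    exact ⟨k, (truthy_iff d hd k).2 ⟨v, hp, hv⟩, hx⟩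
  · rintro ⟨k, ht, hx⟩
    obtain ⟨v, hv, hvz⟩ := (truthy_iff d hd k).1 ht
    exact ⟨(k, v), hv, hvz, hx⟩

-- membership in the literal reverse index, spelled out per key
set_option maxRecDepth 4096 in
theorem mem_enables (k w : String) :
    w ∈ pvEnablesDict.getD k [] ↔
      (k = "annual_report" ∧ w = "annual_report") ∨
      (k = "amendment" ∧ w = "amendment") ∨
      (k = "registered_agent_change" ∧ w = "registered_agent_change") ∨
      (k = "other_license" ∧ w = "certificate_status") ∨
      (k = "formation" ∧ (w = "certificate_status" ∨ w = "certified_copy")) ∨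
      (k = "dissolution" ∧ (w = "dissolution" ∨ w = "withdrawal")) ∨
      (k = "foreign_authority" ∧ w = "withdrawal") ∨
      (k = "reinstatement" ∧ w = "reinstatement") ∨
      (k = "annual_obligation" ∧ w = "compliance_reminder") := by
  simp only [pvEnablesDict, PySem.Dict.getD_eq_get?_getD, PySem.Dict.get?_mk_cons]
  split_ifs with h1 h2 h3 h4 h5 h6 h7 h8 h9 <;> simp only [beq_iff_eq] at * <;>
  first
  | (subst_vars; simp)
  | (simp only [show ({ items := ([] : List (String × List String)) } :
        PySem.Dict String (List String)).get? k = none from rfl,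
      Option.getD_none, List.not_mem_nil, false_iff]
     rintro (⟨rfl, -⟩|⟨rfl, -⟩|⟨rfl, -⟩|⟨rfl, -⟩|⟨rfl, -⟩|⟨rfl, -⟩|⟨rfl, -⟩|⟨rfl, -⟩|⟨rfl, -⟩) <;> simp_all)

theorem counts_keys_nodup (manifest : List (String × List (String × Int))) :
    (pvCounts manifest).keys.Nodup := by
  unfold pvCounts
  split <;> try split
  all_goals exact PySem.Dict.nodup_keys_update _ _ PySem.Dict.nodup_keys_empty

theorem contains_enabled_eq (d : PySem.Dict String Int) (hd : d.keys.Nodup) (w : String)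
    (hw : w ∈ pvWorkflows) :
    PySem.Set.contains (pvEnabled d) w =
      (if w == "compliance_reminder" then pvTruthy (d.get? "annual_obligation")
       else if w == "certificate_status" then pvTruthy (d.get? "other_license") || pvTruthy (d.get? "formation")
       else if w == "certified_copy" then pvTruthy (d.get? "formation")
       else if w == "withdrawal" then pvTruthy (d.get? "foreign_authority") || pvTruthy (d.get? "dissolution")
       else pvTruthy (d.get? w)) := by
  have hmem : PySem.Set.contains (pvEnabled d) w = true ↔ w ∈ pvEnabled d := by
    simp [PySem.Set.contains]
  simp only [pvWorkflows, List.mem_cons, List.not_mem_nil, or_false] at hw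
  rcases hw with rfl|rfl|rfl|rfl|rfl|rfl|rfl|rfl|rfl <;>
  · rw [Bool.eq_iff_iff, hmem, mem_enabled_iff d hd]
    simp only [mem_enables, String.reduceBEq, beq_self_eq_true, if_true, if_false,
      Bool.false_eq_true]
    constructor
    · rintro ⟨k, ht, hk⟩
      rcases hk with ⟨rfl,h⟩|⟨rfl,h⟩|⟨rfl,h⟩|⟨rfl,h⟩|⟨rfl,h⟩|⟨rfl,h⟩|⟨rfl,h⟩|⟨rfl,h⟩|⟨rfl,h⟩ <;>
        simp_all
    · intro ht
      simp only [Bool.or_eq_true] at ht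
      first
        | exact ⟨_, ht, by simp⟩
        | (rcases ht with ht|ht <;> exact ⟨_, ht, by simp⟩)

theorem step_eq (counts : PySem.Dict String Int) (hd : counts.keys.Nodup)
    (w : String) (hw : w ∈ pvWorkflows) (s : PySem.Dict String String) :
    (if w == "compliance_reminder" then
      s.insert w (if pvTruthy (counts.get? "annual_obligation") then "supported" else "operator_research_required")
    else if w == "certificate_status" then
      s.insert w (if pvTruthy (counts.get? "other_license") || pvTruthy (counts.get? "formation") then "operator_assisted" else "operator_research_required")
    else if w == "certified_copy" then
      s.insert w (if pvTruthy (counts.get? "formation") then "operator_assisted" else "operator_research_required")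
    else if w == "withdrawal" then
      s.insert w (if pvTruthy (counts.get? "foreign_authority") || pvTruthy (counts.get? "dissolution") then "operator_assisted" else "operator_research_required")
    else
      s.insert w (if pvTruthy (counts.get? w) then "operator_assisted" else "operator_research_required")) =
    s.insert w (if PySem.Set.contains (pvEnabled counts) w then
                  (if w == "compliance_reminder" then "supported" else "operator_assisted")
                else "operator_research_required") := by
  rw [contains_enabled_eq counts hd w hw]
  have hw' := hw
  simp only [pvWorkflows, List.mem_cons, List.not_mem_nil, or_false] at hw'
  rcases hw' with rfl|rfl|rfl|rfl|rfl|rfl|rfl|rfl|rfl <;> simp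

-- ===== VERDICT (by name: the statement is the Claim_ definition above) =====
theorem lifecycle_support_spec : Claim_equal_lifecycle_support := by
  intro manifest _
  show lifecycle_support manifest = lifecycle_support_alt manifest
  unfold lifecycle_support lifecycle_support_alt
  exact congrArg PySem.Dict.items
    (PySem.List.foldl_congr_mem' pvWorkflows _ _ _
      (fun w hw s => step_eq (pvCounts manifest) (counts_keys_nodup manifest) w hw s))
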